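-- pv_equiv track=rewrite | github.com/koordinates/kart | kart/dataset2_paths.py | b64encode_int
-- ===== SOURCE A (Python) =====
-- _BASE64_URLSAFE_ALPHABET = (
--     b"ABCDEFGHIJKLMNOPQRSTUVWXYZabcdefghijklmnopqrstuvwxyz0123456789-_"
-- )
--
-- MAX_B64_INT = 2 ** 29
--
-- def b64encode_int(integer):
--     """
--     Encodes an integer to a string using exactly five bytes from the urlsafe base64 alphabet.
--     Raises ValueError if the integer is outside the valid range.
--     """
--     if not (-MAX_B64_INT < integer <= MAX_B64_INT):
--         raise ValueError(
--             f"{integer} should be between {-MAX_B64_INT +1} and {MAX_B64_INT}"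
--         )
--
--     result = bytearray(bytes(5))
--     for index in range(4, -1, -1):
--         integer, mod = divmod(integer, 64)
--         result[index] = _BASE64_URLSAFE_ALPHABET[mod]
--     return result.decode("ascii")
-- ===== SOURCE B (Python) =====
-- _BASE64_URLSAFE_ALPHABET = (
--     b"ABCDEFGHIJKLMNOPQRSTUVWXYZabcdefghijklmnopqrstuvwxyz0123456789-_"
-- )
--
-- MAX_B64_INT = 2 ** 29
--
-- def b64encode_int(integer):
--     """
--     Encodes an integer to a string using exactly five bytes from the urlsafe base64 alphabet.
--     Raises ValueError if the integer is outside the valid range.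
--     """
--     if not (-MAX_B64_INT < integer <= MAX_B64_INT):
--         raise ValueError(
--             f"{integer} should be between {-MAX_B64_INT +1} and {MAX_B64_INT}"
--         )
--     # each character depends only on the original integer: arithmetic right shift
--     # floors exactly like Python's divmod, and & 63 is % 64 (also for negatives)
--     return bytes(
--         _BASE64_URLSAFE_ALPHABET[(integer >> shift) & 63] for shift in (24, 18, 12, 6, 0)
--     ).decode("ascii")
-- ===== Notes on version B (the rewrite author's own statement) =====
-- stated objective: simpler
-- what changed: Replaces the stateful backwards divmod loop writing into a bytearray by five independent shift-and-mask alphabet lookups assembled in one bytes(...) expression; no sequential carry state between characters.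
import Mathlib
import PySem

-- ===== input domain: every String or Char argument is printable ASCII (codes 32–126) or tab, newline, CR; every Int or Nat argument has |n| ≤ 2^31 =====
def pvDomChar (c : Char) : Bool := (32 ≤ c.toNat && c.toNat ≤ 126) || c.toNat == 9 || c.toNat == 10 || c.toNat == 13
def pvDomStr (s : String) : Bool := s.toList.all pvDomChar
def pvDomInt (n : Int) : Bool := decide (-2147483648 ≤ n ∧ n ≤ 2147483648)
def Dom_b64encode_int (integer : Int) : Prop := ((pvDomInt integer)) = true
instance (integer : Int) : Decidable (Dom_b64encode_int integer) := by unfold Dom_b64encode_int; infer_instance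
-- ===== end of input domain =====

-- B replaces A's stateful backwards divmod loop by five independent shift-and-mask
-- table lookups; equivalence is proved for all in-range integers (objective: simpler).


-- the urlsafe base64 alphabet, shared module constant of both sources
def pvAlpha : List Char :=
  "ABCDEFGHIJKLMNOPQRSTUVWXYZabcdefghijklmnopqrstuvwxyz0123456789-_".toList

-- ===== PORT A =====
-- for index in range(4,-1,-1): integer, mod = divmod(integer, 64); result[index] = alpha[mod]
def b64encode_int (integer : Int) : String :=
  let st := (PySem.List.pyRange 4 (-1) (-1)).foldl
    (fun (st : Int × List Char) (index : Int) =>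
      let q := PySem.Int.floordiv st.1 64
      let m := PySem.Int.mod st.1 64
      (q, st.2.set index.toNat ((PySem.List.pyGet? pvAlpha m).getD 'A')))
    (integer, ['\x00', '\x00', '\x00', '\x00', '\x00'])
  String.mk st.2

-- ===== PORT B =====
-- bytes(alpha[(integer >> shift) & 63] for shift in (24,18,12,6,0)).decode("ascii")
def b64encode_int_alt (integer : Int) : String :=
  String.mk (([24, 18, 12, 6, 0] : List Nat).map
    (fun (shift : Nat) => (PySem.List.pyGet? pvAlpha (PySem.Int.band (integer >>> shift) 63)).getD 'A'))

-- ===== PRECONDITION & SPEC =====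
-- A (and B) raise ValueError outside (-2^29, 2^29]; exactly those inputs are excluded.
def Pre_b64encode_int (integer : Int) : Prop :=
  -(2 ^ 29) < integer ∧ integer ≤ 2 ^ 29
instance (integer : Int) : Decidable (Pre_b64encode_int integer) := by
  unfold Pre_b64encode_int; infer_instance
def pvWitness_b64encode_int : Int := (12345)

def Spec_b64encode_int (integer : Int) (out : String) : Prop := out = b64encode_int_alt integer
instance (integer : Int) (out : String) : Decidable (Spec_b64encode_int integer out) := by unfold Spec_b64encode_int; infer_instance

-- ===== CLAIM (what is proved, stated in full; the proofs are below) =====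
def Claim_equal_b64encode_int : Prop := ∀ (integer : Int), Dom_b64encode_int integer → Pre_b64encode_int integer → Spec_b64encode_int integer (b64encode_int integer)

-- ===== LEMMAS AND PROOFS =====

-- Python's i >> 6 is floor division by 64, for every integer
theorem pv_shift6 (i : Int) : i >>> (6 : Nat) = PySem.Int.floordiv i 64 := by
  rw [PySem.Int.floordiv_eq_ediv_of_pos (by norm_num)]
  cases i with
  | ofNat n =>
      show Int.ofNat (n >>> 6) = _
      rw [Nat.shiftRight_eq_div_pow]
      norm_num [Int.ofNat_eq_natCast]
  | negSucc n =>
      show Int.negSucc (n >>> 6) = _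
      rw [Nat.shiftRight_eq_div_pow, Int.negSucc_eq, Int.negSucc_eq]
      norm_num
      omega

-- arithmetic right shifts compose
theorem pv_shift_add (i : Int) (m n : Nat) : (i >>> m) >>> n = i >>> (m + n) := by
  cases i <;> (show _ = Int.shiftRight _ _; simp [Int.shiftRight, Nat.shiftRight_add])

-- Python's i & 63 is i % 64, for every integer
theorem pv_band63 (i : Int) : PySem.Int.band i 63 = PySem.Int.mod i 64 := by
  rw [PySem.Int.mod_eq_emod_of_pos (by norm_num)]
  unfold PySem.Int.band
  split_ifs with h1 h2 h2
  · have hm := Nat.and_two_pow_sub_one_eq_mod i.toNat 6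
    rw [show (2 ^ 6 - 1 : Nat) = Int.toNat 63 from rfl] at hm
    rw [hm]
    omega
  · norm_num at h2
  · have hm := Nat.and_two_pow_sub_one_eq_mod (-i - 1).toNat 6
    rw [Nat.and_comm] at hm
    rw [show (2 ^ 6 - 1 : Nat) = Int.toNat 63 from rfl] at hm
    rw [hm]
    omega
  · norm_num at h2

-- ===== VERDICT (by name: the statement is the Claim_ definition above) =====
theorem b64encode_int_spec : Claim_equal_b64encode_int := by
  intro i _ _
  unfold Spec_b64encode_int b64encode_int b64encode_int_alt
  have hr : PySem.List.pyRange 4 (-1) (-1) = [4, 3, 2, 1, 0] := by decide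
  have h0 : i >>> (0 : Nat) = i := by cases i <;> rfl
  have h6 : i >>> (6 : Nat) = PySem.Int.floordiv i 64 := pv_shift6 i
  have h12 : i >>> (12 : Nat) = PySem.Int.floordiv (PySem.Int.floordiv i 64) 64 := by
    rw [show (12 : Nat) = 6 + 6 from rfl, ← pv_shift_add, h6, pv_shift6]
  have h18 : i >>> (18 : Nat) =
      PySem.Int.floordiv (PySem.Int.floordiv (PySem.Int.floordiv i 64) 64) 64 := by
    rw [show (18 : Nat) = 12 + 6 from rfl, ← pv_shift_add, h12, pv_shift6]
  have h24 : i >>> (24 : Nat) =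
      PySem.Int.floordiv (PySem.Int.floordiv (PySem.Int.floordiv (PySem.Int.floordiv i 64) 64) 64) 64 := by
    rw [show (24 : Nat) = 18 + 6 from rfl, ← pv_shift_add, h18, pv_shift6]
  rw [hr]
  simp only [List.foldl, List.map_cons, List.map_nil, pv_band63, h0, h6, h12, h18, h24]
  rfl
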